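-- pv_equiv track=rewrite | github.com/AveryZC14/FIT3155_work | A1/a1q3.py | preprocess_rank
-- ===== SOURCE A (Python) =====
-- def preprocess_rank(bwt_string):
--     char_counts = {}
--     unique_chars = []
--
--     #count how many of each character there are
--     for char in bwt_string:
--
--         if char not in char_counts:
--             char_counts[char] = 0
--             unique_chars.append(char)
--
--         char_counts[char] += 1
--
--     #sort each unique character
--     chars_sorted = sorted(unique_chars)
--
--     rank = {}
--     accumulator = 0
--
--     #iterate through sorted chars, creating the rank array
--     for char in chars_sorted:
--         rank[char] = accumulator
--         accumulator += char_counts[char]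
--
--     return rank
-- ===== SOURCE B (Python) =====
-- def preprocess_rank(bwt_string):
--     # Sort the whole string once; in sorted order a character's first index
--     # equals the number of strictly smaller characters, i.e. its rank.
--     rank = {}
--     for i, ch in enumerate(sorted(bwt_string)):
--         if ch not in rank:
--             rank[ch] = i
--     return rank
-- ===== Notes on version B (the rewrite author's own statement) =====
-- stated objective: simpler
-- what changed: Instead of counting occurrences in a dict, sorting the unique characters and prefix-summing the counts, B sorts the whole string once and records each character's first-occurrence index in the sorted order, which is exactly its cumulative rank.
import Mathlib
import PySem

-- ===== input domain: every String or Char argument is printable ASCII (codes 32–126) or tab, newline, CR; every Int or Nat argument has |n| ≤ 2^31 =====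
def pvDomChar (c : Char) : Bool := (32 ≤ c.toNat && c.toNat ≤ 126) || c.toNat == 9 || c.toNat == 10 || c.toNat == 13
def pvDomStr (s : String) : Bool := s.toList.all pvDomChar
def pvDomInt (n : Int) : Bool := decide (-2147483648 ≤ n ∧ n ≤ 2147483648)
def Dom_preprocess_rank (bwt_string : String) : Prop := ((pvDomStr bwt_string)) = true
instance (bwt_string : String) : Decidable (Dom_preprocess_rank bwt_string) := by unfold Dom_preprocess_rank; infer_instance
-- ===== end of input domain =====

-- B sorts the whole string once and records each character's first index in sorted order
-- (its cumulative rank), instead of A's count-dict + sort-unique + prefix-sum loop; objective: simpler.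
-- Dict keys are single characters, modelled as Char internally and rendered as one-char Strings in the result.

-- ===== PORT A =====
-- loop body of A's counting loop ('if char not in char_counts: …; char_counts[char] += 1';
-- the += 1 is exact as modify with default 0 since the branch guarantees the key is present)
def prA_count_step (st : PySem.Dict Char Int × List Char) (ch : Char) : PySem.Dict Char Int × List Char :=
  let st' := if st.1.contains ch then st else (st.1.insert ch 0, st.2 ++ [ch])
  (st'.1.modify ch 0 (· + 1), st'.2)

-- loop body of A's rank loop ('rank[char] = accumulator; accumulator += char_counts[char]')
def prA_rank_step (cc : PySem.Dict Char Int) (st : PySem.Dict Char Int × Int) (ch : Char) : PySem.Dict Char Int × Int :=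
  (st.1.insert ch st.2, st.2 + cc.getD ch 0)

def preprocess_rank (bwt_string : String) : List (String × Int) :=
  let cu := bwt_string.toList.foldl prA_count_step (PySem.Dict.empty, [])
  let chars_sorted := PySem.List.sorted cu.2 (fun c => c)
  let ra := chars_sorted.foldl (prA_rank_step cu.1) (PySem.Dict.empty, 0)
  ra.1.items.map (fun p => (String.ofList [p.1], p.2))

-- ===== PORT B =====
-- loop body of B ('if ch not in rank: rank[ch] = i')
def prB_step (r : PySem.Dict Char Int) (p : Int × Char) : PySem.Dict Char Int :=
  if r.contains p.2 then r else r.insert p.2 p.1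

def preprocess_rank_alt (bwt_string : String) : List (String × Int) :=
  let rank := (PySem.List.enumerate (PySem.List.sorted bwt_string.toList (fun c => c))).foldl
    prB_step PySem.Dict.empty
  rank.items.map (fun p => (String.ofList [p.1], p.2))

-- ===== PRECONDITION & SPEC =====
def Spec_preprocess_rank (bwt_string : String) (out : List (String × Int)) : Prop := out = preprocess_rank_alt bwt_string
instance (bwt_string : String) (out : List (String × Int)) : Decidable (Spec_preprocess_rank bwt_string out) := by unfold Spec_preprocess_rank; infer_instance

-- ===== CLAIM (what is proved, stated in full; the proofs are below) =====
def Claim_equal_preprocess_rank : Prop := ∀ (bwt_string : String), Dom_preprocess_rank bwt_string → Spec_preprocess_rank bwt_string (preprocess_rank bwt_string)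

-- ===== LEMMAS AND PROOFS =====

lemma loop1_spec (cs : List Char) (d : PySem.Dict Char Int) (u : List Char)
    (h : ∀ c, d.contains c = decide (c ∈ u)) :
    (∀ c, (cs.foldl prA_count_step (d, u)).1.getD c 0 = d.getD c 0 + cs.count c)
    ∧ (cs.foldl prA_count_step (d, u)).2 = PySem.Set.update u cs
    ∧ (∀ c, (cs.foldl prA_count_step (d, u)).1.contains c
        = decide (c ∈ (cs.foldl prA_count_step (d, u)).2)) := by
  induction cs generalizing d u with
  | nil => exact ⟨by simp, by simp [PySem.Set.update_nil], h⟩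
  | cons ch t ih =>
    rw [List.foldl_cons]
    by_cases hm : ch ∈ u
    · have hc : d.contains ch = true := by rw [h]; simp [hm]
      have hstep : prA_count_step (d, u) ch = (d.modify ch 0 (· + 1), u) := by
        simp [prA_count_step, hc]
      rw [hstep]
      have h' : ∀ c, (d.modify ch 0 (· + 1)).contains c = decide (c ∈ u) := by
        intro c
        rw [PySem.Dict.contains_modify]
        by_cases hcc : c = ch <;> simp [hcc, h, hm]
      obtain ⟨ih1, ih2, ih3⟩ := ih (d.modify ch 0 (· + 1)) u h'
      refine ⟨?_, ?_, ih3⟩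
      · intro c
        rw [ih1, PySem.Dict.getD_modify, List.count_cons]
        by_cases hcc : c = ch
        · subst hcc; simp; ring
        · simp [hcc]
          intro hh; exact absurd hh.symm hcc
      · rw [ih2, PySem.Set.update_cons, PySem.Set.add_of_mem hm]
    · have hc : d.contains ch = false := by rw [h]; simp [hm]
      have hstep : prA_count_step (d, u) ch
          = ((d.insert ch 0).modify ch 0 (· + 1), u ++ [ch]) := by
        simp [prA_count_step, hc]
      rw [hstep]
      have h' : ∀ c, ((d.insert ch 0).modify ch 0 (· + 1)).contains c
          = decide (c ∈ u ++ [ch]) := by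
        intro c
        rw [PySem.Dict.contains_modify, PySem.Dict.contains_insert]
        by_cases hcc : c = ch <;> simp [hcc, h]
      obtain ⟨ih1, ih2, ih3⟩ := ih _ _ h'
      refine ⟨?_, ?_, ih3⟩
      · intro c
        rw [ih1, PySem.Dict.getD_modify, List.count_cons]
        by_cases hcc : c = ch
        · subst hcc
          rw [PySem.Dict.getD_of_not_contains d 0 hc]
          simp [PySem.Dict.getD_insert_self]
          omega
        · rw [PySem.Dict.getD_insert_of_ne _ _ _ hcc]
          simp [hcc]
          intro hh
          exact absurd hh.symm hcc
      · rw [ih2, PySem.Set.update_cons, PySem.Set.add_of_not_mem hm]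


def pairsA (cnt : Char → Int) : List Char → Int → List (Char × Int)
  | [], _ => []
  | c :: t, a => (c, a) :: pairsA cnt t (a + cnt c)

lemma loop2_spec (cc : PySem.Dict Char Int) (ks : List Char) (d : PySem.Dict Char Int) (a : Int)
    (hfresh : ∀ c ∈ ks, d.contains c = false) (hnd : ks.Nodup) :
    (ks.foldl (prA_rank_step cc) (d, a)).1.items
      = d.items ++ pairsA (fun c => cc.getD c 0) ks a := by
  induction ks generalizing d a with
  | nil => simp [pairsA]
  | cons c t ih =>
    obtain ⟨hcm, hndt⟩ := List.nodup_cons.mp hnd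
    have hc : d.contains c = false := hfresh c (by simp)
    rw [List.foldl_cons]
    have hstep : prA_rank_step cc (d, a) c = (d.insert c a, a + cc.getD c 0) := rfl
    rw [hstep, ih (d.insert c a) _ ?_ hndt]
    · rw [PySem.Dict.items_insert_of_not_contains d a hc]
      simp [pairsA]
    · intro x hx
      rw [PySem.Dict.contains_insert]
      have hxc : x ≠ c := fun hh => hcm (hh ▸ hx)
      simp [hxc, hfresh x (by simp [hx])]

lemma pairsA_eq (cnt : Char → Int) (ks : List Char) (a : Int) (h : ks.Pairwise (· < ·)) :
    pairsA cnt ks a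
      = ks.map (fun c => (c, a + ((ks.filter (fun x => decide (x < c))).map cnt).sum)) := by
  induction ks generalizing a with
  | nil => simp [pairsA]
  | cons c t ih =>
    obtain ⟨hlt, ht⟩ := List.pairwise_cons.mp h
    rw [pairsA, ih _ ht]
    have hfc : (c :: t).filter (fun x => decide (x < c)) = [] := by
      refine List.filter_eq_nil_iff.mpr ?_
      intro x hx
      rcases List.mem_cons.mp hx with hh | hh
      · simp [hh]
      · simp [not_lt_of_gt (hlt x hh)]
    simp only [List.map_cons, hfc]
    refine congrArg₂ _ (by simp) ?_
    apply List.map_congr_left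
    intro e he
    have hce : c < e := hlt e he
    rw [List.filter_cons]
    simp only [decide_eq_true_eq, if_pos hce, List.map_cons, List.sum_cons]
    congr 1
    ring

lemma idxOf_sorted (s : List Char) (c : Char) (hs : s.Pairwise (· ≤ ·)) (hc : c ∈ s) :
    s.idxOf c = s.countP (fun x => decide (x < c)) := by
  induction s with
  | nil => simp at hc
  | cons a t ih =>
    obtain ⟨hle, ht⟩ := List.pairwise_cons.mp hs
    by_cases hca : c = a
    · subst hca
      rw [List.idxOf_cons_self]
      rw [List.countP_cons]
      simp only [lt_irrefl, decide_false]
      rw [List.countP_eq_zero.mpr]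
      · simp
      · intro x hx
        simp [not_lt_of_ge (hle x hx)]
    · have hct : c ∈ t := by cases hc with | head => exact absurd rfl hca | tail _ hh => exact hh
      have hac : a < c := lt_of_le_of_ne (hle c hct) (fun hh => hca hh.symm)
      rw [List.idxOf_cons_ne _ (by exact fun hh => hca hh.symm), ih ht hct, List.countP_cons]
      simp [hac]

lemma ofList_sublist (s : List Char) : (PySem.Set.ofList s).Sublist s := by
  induction s with
  | nil => simp
  | cons x t ih =>
    rw [PySem.Set.ofList_cons]
    refine List.Sublist.cons₂ x (List.Sublist.trans ?_ ih)
    simp [PySem.Set.discard]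


lemma head_eq_of_mem_sorted {c x : Char} {t : List Char}
    (hle : ∀ y ∈ t, c ≤ y) (ht : t.Pairwise (· ≤ ·)) (hx : x ∈ t) (hxc : x = c) :
    t.head? = some x := by
  cases t with
  | nil => simp at hx
  | cons h t' =>
    have h1 : c ≤ h := hle h (by simp)
    have h2 : h ≤ x := by
      rcases List.mem_cons.mp hx with hh | hh
      · exact hh ▸ le_refl _
      · exact (List.pairwise_cons.mp ht).1 x hh
    have : h = x := le_antisymm h2 (hxc ▸ h1)
    simp [this]

lemma loopB_spec (s : List Char) (n : Int) (d : PySem.Dict Char Int)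
    (hs : s.Pairwise (· ≤ ·)) (hseen : ∀ x ∈ s, d.contains x = true → s.head? = some x) :
    ((PySem.List.enumerate s n).foldl prB_step d).items
      = d.items ++ ((PySem.Set.ofList s).filter (fun c => !d.contains c)).map
          (fun c => (c, n + (s.idxOf c : Int))) := by
  induction s generalizing n d with
  | nil => simp [PySem.Set.ofList_nil]
  | cons c t ih =>
    obtain ⟨hle, ht⟩ := List.pairwise_cons.mp hs
    rw [PySem.List.enumerate_cons, List.foldl_cons, PySem.Set.ofList_cons]
    by_cases hc : d.contains c = true
    · have hstep : prB_step d (n, c) = d := by simp [prB_step, hc]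
      have hinv : ∀ x ∈ t, d.contains x = true → t.head? = some x := by
        intro x hx hcx
        have hxc : x = c := by
          have := hseen x (List.mem_cons_of_mem _ hx) hcx
          simpa using this.symm
        exact head_eq_of_mem_sorted hle ht hx hxc
      rw [hstep, ih (n + 1) d ht hinv]
      congr 1
      have hfc : (c :: (PySem.Set.ofList t).discard c).filter (fun x => !d.contains x)
          = ((PySem.Set.ofList t).discard c).filter (fun x => !d.contains x) := by
        rw [List.filter_cons]; simp [hc]
      rw [hfc, PySem.Set.discard, List.filter_filter]
      have hpred : ∀ x ∈ PySem.Set.ofList t,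
          (!d.contains x && !(x == c)) = (!d.contains x) := by
        intro x hx
        by_cases hxc : x = c
        · subst hxc; simp [hc]
        · simp [hxc]
      rw [List.filter_congr hpred]
      apply List.map_congr_left
      intro x hx
      have hxd : d.contains x = false := by
        have := (List.mem_filter.mp hx).2
        simpa using this
      have hxc : x ≠ c := fun hh => by rw [hh, hc] at hxd; cases hxd
      rw [List.idxOf_cons_ne _ (fun hh => hxc hh.symm)]
      push_cast
      ring_nf
    · have hcf : d.contains c = false := by simpa using hc
      have hstep : prB_step d (n, c) = d.insert c n := by simp [prB_step, hcf]
      have hinv : ∀ x ∈ t, (d.insert c n).contains x = true → t.head? = some x := by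
        intro x hx hcx
        rw [PySem.Dict.contains_insert] at hcx
        have hxc : x = c := by
          rcases Bool.or_eq_true_iff.mp hcx with hh | hh
          · simpa using hh
          · have := hseen x (List.mem_cons_of_mem _ hx) hh
            simpa using this.symm
        exact head_eq_of_mem_sorted hle ht hx hxc
      rw [hstep, ih (n + 1) (d.insert c n) ht hinv]
      rw [PySem.Dict.items_insert_of_not_contains d n hcf]
      have hfc : (c :: (PySem.Set.ofList t).discard c).filter (fun x => !d.contains x)
          = c :: ((PySem.Set.ofList t).discard c).filter (fun x => !d.contains x) := by
        rw [List.filter_cons]; simp [hcf]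
      rw [hfc, List.map_cons, List.idxOf_cons_self, List.append_assoc]
      congr 1
      simp only [Nat.cast_zero, add_zero, List.singleton_append]
      congr 1
      rw [PySem.Set.discard, List.filter_filter]
      have hpred : ∀ x ∈ PySem.Set.ofList t,
          (!(d.insert c n).contains x) = (!d.contains x && !(x == c)) := by
        intro x hx
        rw [PySem.Dict.contains_insert]
        by_cases hxc : x = c <;> simp [hxc, Bool.and_comm]
      rw [List.filter_congr hpred]
      apply List.map_congr_left
      intro x hx
      have hxc : x ≠ c := by
        have := (List.mem_filter.mp hx).2
        by_cases hh : x = c <;> simp [hh] at this ⊢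
      rw [List.idxOf_cons_ne _ (fun hh => hxc hh.symm)]
      push_cast
      ring_nf

-- ===== VERDICT (by name: the statement is the Claim_ definition above) =====
theorem preprocess_rank_spec : Claim_equal_preprocess_rank := by
  intro bw _
  unfold Spec_preprocess_rank
  unfold preprocess_rank preprocess_rank_alt
  dsimp only
  set cs := bw.toList with hcs
  obtain ⟨h1, h2, h3⟩ := loop1_spec cs PySem.Dict.empty [] (by intro c; simp)
  set cu := cs.foldl prA_count_step (PySem.Dict.empty, []) with hcu
  have hu : cu.2 = PySem.Set.ofList cs := by
    rw [h2]; exact PySem.Set.update_empty cs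
  set ks := PySem.List.sorted cu.2 (fun c => c) with hks
  have hperm : ks.Perm (PySem.Set.ofList cs) := hu ▸ PySem.List.sorted_perm cu.2 (fun c => c) false
  have hnodup : ks.Nodup := hperm.nodup_iff.mpr (PySem.Set.nodup_ofList cs)
  have hpw : ks.Pairwise (· ≤ ·) := PySem.List.sorted_pairwise cu.2 (fun c => c)
  have hlt : ks.Pairwise (· < ·) :=
    (hpw.and hnodup).imp (fun h => lt_of_le_of_ne h.1 h.2)
  rw [loop2_spec cu.1 ks PySem.Dict.empty 0 (by intro c _; rfl) hnodup,
      pairsA_eq _ ks 0 hlt]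
  -- B side
  set s := PySem.List.sorted cs (fun c => c) with hsdef
  have hsp : s.Pairwise (· ≤ ·) := PySem.List.sorted_pairwise cs (fun c => c)
  have hsperm : s.Perm cs := PySem.List.sorted_perm cs (fun c => c) false
  rw [loopB_spec s 0 PySem.Dict.empty hsp
        (by intro x _ hcx; rw [PySem.Dict.contains_empty] at hcx; cases hcx)]
  have hfilt : (PySem.Set.ofList s).filter (fun c => !(PySem.Dict.empty : PySem.Dict Char Int).contains c)
      = PySem.Set.ofList s := by
    apply List.filter_eq_self.mpr
    intro x _
    rw [PySem.Dict.contains_empty]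
    rfl
  rw [hfilt]
  have hos : PySem.Set.ofList s = ks := by
    refine PySem.List.eq_of_perm_of_pairwise_le_of_injective (fun c => c)
      (fun a b hh => hh) ?_ (List.Pairwise.sublist (ofList_sublist s) hsp) hpw
    refine (List.perm_ext_iff_of_nodup (PySem.Set.nodup_ofList s) hnodup).mpr ?_
    intro x
    rw [PySem.Set.mem_ofList _ x]
    constructor
    · intro hx
      exact hperm.mem_iff.mpr ((PySem.Set.mem_ofList _ _).mpr (hsperm.mem_iff.mp hx))
    · intro hx
      exact hsperm.mem_iff.mpr ((PySem.Set.mem_ofList _ _).mp (hperm.mem_iff.mp hx))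
  rw [hos]
  have hempty : (PySem.Dict.empty : PySem.Dict Char Int).items = [] := rfl
  rw [hempty]
  simp only [List.nil_append]
  congr 1
  apply List.map_congr_left
  intro c hc
  have hkd : ks.Perm cs.dedup := by
    refine (List.perm_ext_iff_of_nodup hnodup cs.nodup_dedup).mpr ?_
    intro x
    rw [List.mem_dedup, hperm.mem_iff, PySem.Set.mem_ofList _ x]
  have hcnt : ∀ x ∈ ks, cu.1.getD x 0 = (cs.count x : Int) := by
    intro x _
    rw [h1 x, PySem.Dict.getD_empty]
    ring
  have hsum : ((ks.filter (fun x => decide (x < c))).map (fun x => cu.1.getD x 0)).sum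
      = (cs.countP (fun x => decide (x < c)) : Int) := by
    rw [List.map_congr_left (fun x hx => hcnt x (List.mem_of_mem_filter hx))]
    have hp : ((ks.filter (fun x => decide (x < c))).map (fun x => (cs.count x : Int))).sum
        = ((cs.dedup.filter (fun x => decide (x < c))).map (fun x => (cs.count x : Int))).sum :=
      ((hkd.filter _).map _).sum_eq
    rw [hp]
    have := List.sum_map_count_dedup_filter_eq_countP (fun x => decide (x < c)) cs
    calc ((cs.dedup.filter (fun x => decide (x < c))).map (fun x => (cs.count x : Int))).sum
        = (((cs.dedup.filter (fun x => decide (x < c))).map (fun x => cs.count x)).map (Nat.cast : Nat → Int)).sum := by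
          rw [List.map_map]; rfl
      _ = (((cs.dedup.filter (fun x => decide (x < c))).map (fun x => cs.count x)).sum : Int) := by
          rw [Nat.cast_list_sum]
      _ = _ := by rw [this]
  rw [hsum]
  have hcs2 : c ∈ s := by
    rw [← hos] at hc
    exact (ofList_sublist s).mem hc  -- hmm mem of sublist
  rw [idxOf_sorted s c hsp hcs2, hsperm.countP_eq]
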